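-- pv_equiv track=rewrite | github.com/redthing1/w1tn3ss | test/w1replay/e2e/common.py | pick_known_registers
-- ===== SOURCE A (Python) =====
-- from typing import Callable, Dict, Iterable, List, Optional, Sequence, Tuple
--
-- def pick_known_registers(regs: Dict[str, int], count: int) -> List[Tuple[str, int]]:
--     exclude = {
--         "pc",
--         "sp",
--         "nzcv",
--         "cpsr",
--         "rflags",
--         "eflags",
--         "cs",
--         "ss",
--         "ds",
--         "es",
--         "fs",
--         "gs",
--         "lr",
--     }
--     general = set()
--     for i in range(31):
--         general.add(f"x{i}")
--     for i in range(13):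
--         general.add(f"r{i}")
--     for i in range(8, 16):
--         general.add(f"r{i}")
--     general.update(
--         {
--             "rax",
--             "rbx",
--             "rcx",
--             "rdx",
--             "rsi",
--             "rdi",
--             "rbp",
--             "r8",
--             "r9",
--             "r10",
--             "r11",
--             "r12",
--             "r13",
--             "r14",
--             "r15",
--             "eax",
--             "ebx",
--             "ecx",
--             "edx",
--             "esi",
--             "edi",
--             "ebp",
--         }
--     )
--     items = [
--         (name, value)
--         for name, value in regs.items()
--         if name not in exclude and name in general
--     ]
--     items.sort(key=lambda item: item[0])
--     if len(items) >= count: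
--         return items[:count]
--     fallback = [
--         (name, value) for name, value in regs.items() if name not in exclude
--     ]
--     fallback.sort(key=lambda item: item[0])
--     return fallback[:count]
-- ===== SOURCE B (Python) =====
-- def pick_known_registers(regs, count):
--     exclude = ("pc", "sp", "nzcv", "cpsr", "rflags", "eflags",
--                "cs", "ss", "ds", "es", "fs", "gs", "lr")
--     general = (
--         "x0", "x1", "x2", "x3", "x4", "x5", "x6", "x7", "x8", "x9",
--         "x10", "x11", "x12", "x13", "x14", "x15", "x16", "x17", "x18", "x19",
--         "x20", "x21", "x22", "x23", "x24", "x25", "x26", "x27", "x28", "x29", "x30",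
--         "r0", "r1", "r2", "r3", "r4", "r5", "r6", "r7",
--         "r8", "r9", "r10", "r11", "r12", "r13", "r14", "r15",
--         "rax", "rbx", "rcx", "rdx", "rsi", "rdi", "rbp",
--         "eax", "ebx", "ecx", "edx", "esi", "edi", "ebp",
--     )
--
--     def insort(lst, pair):
--         # insert pair into the name-sorted list lst, keeping it sorted
--         i = 0
--         while i < len(lst) and lst[i][0] < pair[0]:
--             i += 1
--         lst.insert(i, pair)
--
--     items = []
--     fallback = []
--     # one pass: build both sorted selections directly by ordered insertion
--     for name, value in regs.items():
--         if name in exclude: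
--             continue
--         insort(fallback, (name, value))
--         if name in general:
--             insort(items, (name, value))
--     return items[:count] if len(items) >= count else fallback[:count]
-- ===== Notes on version B (the rewrite author's own statement) =====
-- stated objective: alternative
-- what changed: B replaces A's staged filter-comprehension + list.sort passes by a single explicit loop over the registers that maintains both result lists already sorted via hand-written ordered insertion (an incremental insertion sort), and replaces A's three set-building loops by one literal name tuple.
import Mathlib
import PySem

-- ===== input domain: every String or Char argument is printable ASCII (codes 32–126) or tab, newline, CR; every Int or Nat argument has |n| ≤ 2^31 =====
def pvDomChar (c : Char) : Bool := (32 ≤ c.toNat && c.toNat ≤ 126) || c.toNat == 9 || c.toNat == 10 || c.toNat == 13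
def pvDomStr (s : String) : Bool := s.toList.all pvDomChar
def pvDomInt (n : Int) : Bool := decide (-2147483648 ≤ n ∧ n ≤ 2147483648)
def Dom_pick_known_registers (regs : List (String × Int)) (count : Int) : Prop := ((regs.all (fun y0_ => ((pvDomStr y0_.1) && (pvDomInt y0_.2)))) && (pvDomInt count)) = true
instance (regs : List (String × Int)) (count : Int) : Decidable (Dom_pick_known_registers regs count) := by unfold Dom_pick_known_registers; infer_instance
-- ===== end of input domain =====

-- B replaces A's filter-then-sort passes by one explicit loop that keeps both result
-- lists sorted via hand-written ordered insertion (incremental insertion sort); objective: alternative.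

-- ===== PORT A =====
def pvExclude : PySem.Set String :=
  PySem.Set.ofList ["pc", "sp", "nzcv", "cpsr", "rflags", "eflags",
                    "cs", "ss", "ds", "es", "fs", "gs", "lr"]

def pvGeneralUpd : List String :=
  ["rax", "rbx", "rcx", "rdx", "rsi", "rdi", "rbp",
   "r8", "r9", "r10", "r11", "r12", "r13", "r14", "r15",
   "eax", "ebx", "ecx", "edx", "esi", "edi", "ebp"]

-- A's construction of `general`: three add-loops then `update` with the literal set
def pvGeneralA : PySem.Set String :=
  let g1 := (PySem.List.pyRange 0 31 1).foldl
    (fun s i => PySem.Set.add s (String.ofList ('x' :: PySem.Int.toChars i))) PySem.Set.empty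
  let g2 := (PySem.List.pyRange 0 13 1).foldl
    (fun s i => PySem.Set.add s (String.ofList ('r' :: PySem.Int.toChars i))) g1
  let g3 := (PySem.List.pyRange 8 16 1).foldl
    (fun s i => PySem.Set.add s (String.ofList ('r' :: PySem.Int.toChars i))) g2
  PySem.Set.update g3 pvGeneralUpd

def pick_known_registers (regs : List (String × Int)) (count : Int) : List (String × Int) :=
  let items := PySem.List.sorted
    (regs.filter (fun nv => !(PySem.Set.contains pvExclude nv.1) && PySem.Set.contains pvGeneralA nv.1))
    (fun item => item.1) false
  if (items.length : Int) ≥ count then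
    PySem.List.slice items none (some count)
  else
    let fallback := PySem.List.sorted
      (regs.filter (fun nv => !(PySem.Set.contains pvExclude nv.1)))
      (fun item => item.1) false
    PySem.List.slice fallback none (some count)

-- ===== PORT B =====
-- B's literal tuples of names
def pvExcludeTup : List String :=
  ["pc", "sp", "nzcv", "cpsr", "rflags", "eflags",
   "cs", "ss", "ds", "es", "fs", "gs", "lr"]

def pvGeneralTup : List String :=
  ["x0", "x1", "x2", "x3", "x4", "x5", "x6", "x7", "x8", "x9",
   "x10", "x11", "x12", "x13", "x14", "x15", "x16", "x17", "x18", "x19",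
   "x20", "x21", "x22", "x23", "x24", "x25", "x26", "x27", "x28", "x29", "x30",
   "r0", "r1", "r2", "r3", "r4", "r5", "r6", "r7",
   "r8", "r9", "r10", "r11", "r12", "r13", "r14", "r15",
   "rax", "rbx", "rcx", "rdx", "rsi", "rdi", "rbp",
   "eax", "ebx", "ecx", "edx", "esi", "edi", "ebp"]

-- B's insort: scan past the names below pair's name, insert there (keeps the list sorted)
def pvInsort (lst : List (String × Int)) (pair : String × Int) : List (String × Int) :=
  match lst with
  | [] => [pair]
  | q :: rest => if q.1 < pair.1 then q :: pvInsort rest pair else pair :: q :: rest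

-- B's single pass maintaining both sorted lists
def pick_known_registers_alt (regs : List (String × Int)) (count : Int) : List (String × Int) :=
  let st := regs.foldl
    (fun (st : List (String × Int) × List (String × Int)) nv =>
      if pvExcludeTup.contains nv.1 then st
      else
        let fallback := pvInsort st.2 nv
        let items := if pvGeneralTup.contains nv.1 then pvInsort st.1 nv else st.1
        (items, fallback))
    ([], [])
  if (st.1.length : Int) ≥ count then
    PySem.List.slice st.1 none (some count)
  else
    PySem.List.slice st.2 none (some count)

-- ===== PRECONDITION & SPEC =====
-- Pre_ requires distinct register names: `regs` models the Python dict argument, whose keys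
-- are unique, so lists with duplicate names do not correspond to any input of A.
def Pre_pick_known_registers (regs : List (String × Int)) (count : Int) : Prop :=
  (regs.map Prod.fst).Nodup
instance (regs : List (String × Int)) (count : Int) : Decidable (Pre_pick_known_registers regs count) := by unfold Pre_pick_known_registers; infer_instance

def pvWitness_pick_known_registers : (List (String × Int)) × Int :=
  ([("rax", 7), ("pc", 2), ("zz", 3)], 2)

def Spec_pick_known_registers (regs : List (String × Int)) (count : Int) (out : List (String × Int)) : Prop := out = pick_known_registers_alt regs count
instance (regs : List (String × Int)) (count : Int) (out : List (String × Int)) : Decidable (Spec_pick_known_registers regs count out) := by unfold Spec_pick_known_registers; infer_instance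

-- ===== CLAIM (what is proved, stated in full; the proofs are below) =====
def Claim_equal_pick_known_registers : Prop := ∀ (regs : List (String × Int)) (count : Int), Dom_pick_known_registers regs count → Pre_pick_known_registers regs count → Spec_pick_known_registers regs count (pick_known_registers regs count)

-- ===== LEMMAS AND PROOFS =====

-- one filtered insertion pass, as a standalone fold (used to split B's two accumulators)
def pvSortIns (pred : String × Int → Bool) (l : List (String × Int)) : List (String × Int) :=
  l.foldl (fun acc nv => if pred nv then pvInsort acc nv else acc) []

theorem pvInsort_perm (lst : List (String × Int)) (p : String × Int) :
    (pvInsort lst p).Perm (p :: lst) := by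
  induction lst with
  | nil => simp [pvInsort]
  | cons q rest ih =>
    simp only [pvInsort]
    split_ifs with h
    · exact ((ih.cons q).trans (List.Perm.swap p q rest))
    · exact List.Perm.refl _

theorem pvInsort_pairwise (lst : List (String × Int)) (p : String × Int)
    (h : lst.Pairwise (fun a b => a.1 < b.1)) (hne : ∀ q ∈ lst, q.1 ≠ p.1) :
    (pvInsort lst p).Pairwise (fun a b => a.1 < b.1) := by
  induction lst with
  | nil => simp [pvInsort]
  | cons q rest ih =>
    rw [List.pairwise_cons] at h
    simp only [pvInsort]
    split_ifs with hlt
    · refine List.pairwise_cons.mpr ⟨?_, ih h.2 (fun r hr => hne r (List.mem_cons_of_mem q hr))⟩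
      intro b hb
      rcases List.mem_cons.mp (((pvInsort_perm rest p).mem_iff).mp hb) with hb | hb
      · simpa [hb] using hlt
      · exact h.1 b hb
    · refine List.pairwise_cons.mpr ⟨?_, List.pairwise_cons.mpr ⟨h.1, h.2⟩⟩
      intro b hb
      have hpq : p.1 < q.1 :=
        lt_of_le_of_ne (le_of_not_gt hlt) ((hne q (List.mem_cons_self)).symm)
      rcases List.mem_cons.mp hb with hb | hb
      · simpa [hb] using hpq
      · exact hpq.trans (h.1 b hb)

theorem pvSortIns_perm_aux (pred : String × Int → Bool) (l : List (String × Int)) :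
    ∀ acc, (l.foldl (fun a nv => if pred nv then pvInsort a nv else a) acc).Perm
      (l.filter pred ++ acc) := by
  induction l with
  | nil => intro acc; simp
  | cons x l ih =>
    intro acc
    simp only [List.foldl_cons, List.filter_cons]
    split_ifs with h
    · exact (ih _).trans (((pvInsort_perm acc x).append_left (l.filter pred)).trans
        List.perm_middle)
    · exact ih acc

theorem pvSortIns_perm (pred : String × Int → Bool) (l : List (String × Int)) :
    (pvSortIns pred l).Perm (l.filter pred) := by
  simpa using pvSortIns_perm_aux pred l []

theorem pvSortIns_pairwise_aux (pred : String × Int → Bool) (l : List (String × Int)) :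
    ∀ acc, acc.Pairwise (fun a b => a.1 < b.1) →
      ((l.map Prod.fst) ++ acc.map Prod.fst).Nodup →
      (l.foldl (fun a nv => if pred nv then pvInsort a nv else a) acc).Pairwise
        (fun a b => a.1 < b.1) := by
  induction l with
  | nil => intro acc hp _; simpa using hp
  | cons x l ih =>
    intro acc hp hnd
    simp only [List.map_cons, List.cons_append, List.nodup_cons] at hnd
    simp only [List.foldl_cons]
    split_ifs with h
    · refine ih _ ?_ ?_
      · exact pvInsort_pairwise acc x hp
          (fun q hq h' => hnd.1 (List.mem_append_right _ (h' ▸ List.mem_map_of_mem hq)))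
      · have hperm : ((pvInsort acc x).map Prod.fst).Perm (x.1 :: acc.map Prod.fst) :=
          (pvInsort_perm acc x).map Prod.fst
        have : (l.map Prod.fst ++ (x.1 :: acc.map Prod.fst)).Nodup := by
          refine (List.perm_middle.nodup_iff).mpr ?_
          simpa using List.nodup_cons.mpr hnd
        exact ((hperm.append_left (l.map Prod.fst)).nodup_iff).mpr this
    · exact ih acc hp hnd.2

theorem pvSortIns_eq_sorted (pred : String × Int → Bool) (l : List (String × Int))
    (hnd : (l.map Prod.fst).Nodup) :
    PySem.List.sorted (l.filter pred) (fun item => item.1) false = pvSortIns pred l := by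
  refine PySem.List.sorted_eq_of_perm_of_pairwise_lt _ _ _ (pvSortIns_perm pred l) ?_
  have := pvSortIns_pairwise_aux pred l [] (by simp) (by simpa using hnd)
  simpa [pvSortIns] using this

-- B's membership tests agree with A's set constructions
set_option maxRecDepth 16384 in
theorem pvExclude_eq : pvExclude = pvExcludeTup := by decide

set_option maxRecDepth 16384 in
theorem pvGeneral_eq : pvGeneralA = pvGeneralTup := by decide

theorem pvContains_exclude (n : String) :
    pvExcludeTup.contains n = PySem.Set.contains pvExclude n := by
  simp [PySem.Set.contains, pvExclude_eq]

theorem pvContains_general (n : String) :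
    pvGeneralTup.contains n = PySem.Set.contains pvGeneralA n := by
  simp [PySem.Set.contains, pvGeneral_eq]

-- the pair-state loop of B is the two standalone insertion passes
theorem pvFold_split (regs : List (String × Int)) :
    (regs.foldl
      (fun (st : List (String × Int) × List (String × Int)) nv =>
        if pvExcludeTup.contains nv.1 then st
        else
          let fallback := pvInsort st.2 nv
          let items := if pvGeneralTup.contains nv.1 then pvInsort st.1 nv else st.1
          (items, fallback))
      ([], []))
    = (pvSortIns (fun nv => !(pvExcludeTup.contains nv.1) && pvGeneralTup.contains nv.1) regs,
       pvSortIns (fun nv => !(pvExcludeTup.contains nv.1)) regs) := by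
  unfold pvSortIns
  rw [← PySem.List.foldl_prod_mk
    (f := fun acc nv => if !(pvExcludeTup.contains nv.1) && pvGeneralTup.contains nv.1
      then pvInsort acc nv else acc)
    (g := fun acc nv => if !(pvExcludeTup.contains nv.1) then pvInsort acc nv else acc)]
  congr 1
  funext st nv
  by_cases hex : nv.1 ∈ pvExcludeTup <;> by_cases hg : nv.1 ∈ pvGeneralTup <;>
    simp [hex, hg]

theorem pick_known_registers_spec : Claim_equal_pick_known_registers := by
  intro regs count _ hpre
  unfold Spec_pick_known_registers pick_known_registers pick_known_registers_alt
  rw [pvFold_split]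
  have hnd : (regs.map Prod.fst).Nodup := hpre
  have hitems := pvSortIns_eq_sorted
    (fun nv => !(pvExcludeTup.contains nv.1) && pvGeneralTup.contains nv.1) regs hnd
  have hfb := pvSortIns_eq_sorted (fun nv => !(pvExcludeTup.contains nv.1)) regs hnd
  simp only [pvContains_exclude, pvContains_general] at hitems hfb
  simp only [hitems, hfb]
  simp only [pvContains_exclude, pvContains_general]
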